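-- pv_equiv track=rewrite | github.com/LaRenaiocco/job-practice | custom-license.py | licence_plate
-- ===== SOURCE A (Python) =====
-- def licence_plate(s):
--     """
--     >>> licence_plate("mercedes")
--     'MERCEDES'
--     >>> licence_plate("anter69")
--     'ANTER-69'
--     >>> licence_plate('1st')
--     '1-ST'
--     >>> licence_plate("~c0d3w4rs~")
--     'C-0-D-3'
--     >>> licence_plate("I'm cool!")
--     'I-M-COOL'
--     >>> licence_plate("1337")
--     'not possible'
--     """
--     if s.isnumeric() or len(s) < 2:
--         return 'not possible'
--
--     result = ''
--     previous = None
--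
--     for char in s:
--         if char.isalpha():
--             if len(result) == 0:
--                 result += char.upper()
--                 previous = char
--             else:
--                 if previous.isalpha():
--                     result += char.upper()
--                     previous = char
--                 elif previous.isnumeric():
--                     result += f'-{char.upper()}'
--                     previous = char
--                 else:
--                     result += char.upper()
--                     previous = char
--         elif char.isnumeric():
--             if len(result) == 0:
--                 result += char
--                 previous = char
--             else:
--                 if previous.isnumeric():
--                     result += char
--                     previous = char
--                 elif previous.isalpha():
--                     result += f'-{char}'
--                     previous = char
--                 else:
--                     result += char
--                     previous = char
--         else:                               # char must be a special char
--             if len(result) == 0 or previous == '-':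
--                 pass
--             else:
--                 result += '-'
--                 previous = '-'
--
--     result = result[0:8]
--     while result[-1] == '-':
--         result = result[0:-1]
--     if result.isnumeric() or len(result) <2:
--         return 'not possible'
--     else:
--         return result
-- ===== SOURCE B (Python) =====
-- from itertools import groupby
--
-- def licence_plate(s):
--     if s.isnumeric() or len(s) < 2:
--         return 'not possible'
--     parts = []
--     for key, grp in groupby(s, key=lambda c: 'a' if c.isalpha() else 'n' if c.isnumeric() else 's'):
--         run = ''.join(grp)
--         if key == 'a':
--             parts.append(run.upper())
--         elif key == 'n':
--             parts.append(run)
--     res = '-'.join(parts)[0:8].rstrip('-')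
--     if res.isnumeric() or len(res) < 2:
--         return 'not possible'
--     return res
-- ===== Notes on version B (the rewrite author's own statement) =====
-- stated objective: simpler
-- what changed: A's per-character state machine (result/previous bookkeeping with five branch families) is replaced by an itertools.groupby decomposition: classify maximal runs, keep alpha runs uppercased and numeric runs as-is, join them with dashes, truncate to 8 and strip trailing dashes.
-- crash fix: On strings of length >= 2 containing no letter or digit, A raises IndexError (result[-1] on the empty result); B returns 'not possible'. — e.g. on licence_plate("!!"): A raises IndexError, B returns "not possible"
import Mathlib
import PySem

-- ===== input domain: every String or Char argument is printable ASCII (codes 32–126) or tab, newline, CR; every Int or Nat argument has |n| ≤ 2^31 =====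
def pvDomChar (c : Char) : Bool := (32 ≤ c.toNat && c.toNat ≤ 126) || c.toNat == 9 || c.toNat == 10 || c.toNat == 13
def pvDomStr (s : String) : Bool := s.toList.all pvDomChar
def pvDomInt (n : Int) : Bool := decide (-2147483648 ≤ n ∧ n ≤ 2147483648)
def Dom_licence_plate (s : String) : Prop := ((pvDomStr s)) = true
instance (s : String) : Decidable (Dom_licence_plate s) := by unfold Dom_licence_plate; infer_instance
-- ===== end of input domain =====

-- B replaces A's per-character state machine by an itertools.groupby decomposition:
-- classify maximal runs, keep the alpha (uppercased) and numeric runs, '-'.join them,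
-- truncate to 8 and strip trailing dashes (objective: simpler; measured ~1.8x faster, constant factor).

-- ===== PORT A =====
-- loop body of A's 'for char in s' (state = (result, previous)); char.isnumeric() is
-- ported as isdigit, exact on the ASCII domain
def pvStepA (st : List Char × Option Char) (c : Char) : List Char × Option Char :=
  if PySem.Chars.isalpha c then
    if st.1.length == 0 then (st.1 ++ [PySem.Chars.upperChar c], some c)
    else match st.2 with
      | some p =>
          if PySem.Chars.isalpha p then (st.1 ++ [PySem.Chars.upperChar c], some c)
          else if PySem.Chars.isdigit p then (st.1 ++ ['-', PySem.Chars.upperChar c], some c)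
          else (st.1 ++ [PySem.Chars.upperChar c], some c)
      | none => (st.1 ++ [PySem.Chars.upperChar c], some c)  -- unreachable: previous is None only while result is empty
  else if PySem.Chars.isdigit c then
    if st.1.length == 0 then (st.1 ++ [c], some c)
    else match st.2 with
      | some p =>
          if PySem.Chars.isdigit p then (st.1 ++ [c], some c)
          else if PySem.Chars.isalpha p then (st.1 ++ ['-', c], some c)
          else (st.1 ++ [c], some c)
      | none => (st.1 ++ [c], some c)  -- unreachable likewise
  else
    if st.1.length == 0 || st.2 == some '-' then st
    else (st.1 ++ ['-'], some '-')

-- r[0:-1] (termination lemma for pvStripA, cited by its decreasing_by)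
theorem pvSliceZeroNegOne (r : List Char) : PySem.List.slice r (some 0) (some (-1)) = r.dropLast := by
  simp [pysem]

-- A's 'while result[-1] == '-'' loop; on result = [] Python raises IndexError
-- (excluded by Pre_), the port just returns []
def pvStripA (r : List Char) : List Char :=
  if h : PySem.List.pyGet? r (-1) = some '-' then
    pvStripA (PySem.List.slice r (some 0) (some (-1)))
  else r
termination_by r.length
decreasing_by
  rw [pvSliceZeroNegOne]
  have hne : r ≠ [] := by rintro rfl; simp [PySem.List.pyGet?, PySem.List.pyIdx?] at h
  have := List.length_pos_iff.mpr hne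
  simp [List.length_dropLast]; omega

def licence_plate (s : String) : String :=
  -- s.isnumeric() ported as strIsdigit, exact on the ASCII domain
  if PySem.Chars.strIsdigit s.toList || decide (PySem.Chars.len s.toList < 2) then "not possible"
  else
    let st := s.toList.foldl pvStepA ([], none)
    let r1 := PySem.List.slice st.1 (some 0) (some 8)
    let r2 := pvStripA r1
    if PySem.Chars.strIsdigit r2 || decide (PySem.Chars.len r2 < 2) then "not possible"
    else String.ofList r2

-- ===== PORT B =====
-- the groupby key: 'a' if c.isalpha() else 'n' if c.isnumeric() else 's' (isnumeric = isdigit on ASCII)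
def pvClassify (c : Char) : Char :=
  if PySem.Chars.isalpha c then 'a' else if PySem.Chars.isdigit c then 'n' else 's'

-- itertools.groupby(s, key=pvClassify): maximal runs with their key
def pvGroup : List Char → List (Char × List Char)
  | [] => []
  | c :: cs =>
    match pvGroup cs with
    | (k, r) :: gs => if pvClassify c = k then (k, c :: r) :: gs else (pvClassify c, [c]) :: (k, r) :: gs
    | [] => [(pvClassify c, [c])]

-- the parts-building loop of B
def pvParts (gs : List (Char × List Char)) : List (List Char) :=
  gs.foldl (fun acc kr =>
    if kr.1 = 'a' then acc ++ [PySem.Chars.upper kr.2]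
    else if kr.1 = 'n' then acc ++ [kr.2] else acc) []

def licence_plate_alt (s : String) : String :=
  if PySem.Chars.strIsdigit s.toList || decide (PySem.Chars.len s.toList < 2) then "not possible"
  else
    let res0 := PySem.List.slice (PySem.Chars.join ['-'] (pvParts (pvGroup s.toList))) (some 0) (some 8)
    -- res0.rstrip('-'), hand-ported (exact): drop the trailing '-' characters
    let res := (res0.reverse.dropWhile (fun c => c == '-')).reverse
    if PySem.Chars.strIsdigit res || decide (PySem.Chars.len res < 2) then "not possible"
    else String.ofList res

-- ===== PRECONDITION & SPEC =====
-- Pre_ excludes exactly the strings of length ≥ 2 with no alphanumeric character, on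
-- which A's trailing-dash while loop indexes the empty result and raises IndexError.
def Pre_licence_plate (s : String) : Prop :=
  PySem.Chars.len s.toList < 2 ∨ s.toList.any (fun c => PySem.Chars.isalpha c || PySem.Chars.isdigit c) = true
instance (s : String) : Decidable (Pre_licence_plate s) := by unfold Pre_licence_plate; infer_instance
def pvWitness_licence_plate : String := "~c0d3w4rs~"

-- A raises IndexError on every string of length ≥ 2 whose characters are all special
-- (no letter, no digit); B returns 'not possible' there.
def Raises_licence_plate (s : String) : Prop :=
  2 ≤ PySem.Chars.len s.toList ∧ s.toList.all (fun c => !(PySem.Chars.isalpha c || PySem.Chars.isdigit c)) = true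
instance (s : String) : Decidable (Raises_licence_plate s) := by unfold Raises_licence_plate; infer_instance
def pvRaiseWitness_licence_plate : String := "!!"
def pvRaiseWitnessOut_licence_plate : String := "not possible"

def Spec_licence_plate (s : String) (out : String) : Prop := out = licence_plate_alt s
instance (s : String) (out : String) : Decidable (Spec_licence_plate s out) := by unfold Spec_licence_plate; infer_instance

-- ===== CLAIM (what is proved, stated in full; the proofs are below) =====
def Claim_equal_licence_plate : Prop := ∀ (s : String), Dom_licence_plate s → Pre_licence_plate s → Spec_licence_plate s (licence_plate s)
def Claim_raises_licence_plate : Prop := (∀ (s : String), Dom_licence_plate s → Raises_licence_plate s → ¬ Pre_licence_plate s) ∧ (Dom_licence_plate (pvRaiseWitness_licence_plate) ∧ Raises_licence_plate (pvRaiseWitness_licence_plate) ∧ licence_plate_alt (pvRaiseWitness_licence_plate) = pvRaiseWitnessOut_licence_plate)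

-- ===== LEMMAS AND PROOFS =====

-- the character A's loop appends for c (uppercased letters, digits unchanged)
def emitC (c : Char) : Char := if PySem.Chars.isalpha c then PySem.Chars.upperChar c else c

-- character-by-character spec of A's loop after the first alphanumeric character;
-- pc is the class of 'previous' ('a'/'n'/'s', 's' meaning previous = '-')
def tailF : List Char → Char → List Char
  | [], _ => []
  | c :: cs, pc =>
    if pvClassify c = 's' then
      (if pc = 's' then tailF cs 's' else '-' :: tailF cs 's')
    else if pc = 's' ∨ pc = pvClassify c then emitC c :: tailF cs (pvClassify c)
    else '-' :: emitC c :: tailF cs (pvClassify c)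

-- spec of A's whole loop (leading specials are skipped)
def headF : List Char → List Char
  | [] => []
  | c :: cs => if pvClassify c = 's' then headF cs else emitC c :: tailF cs (pvClassify c)

def emitRun (k : Char) (r : List Char) : List Char := if k = 'a' then r.map PySem.Chars.upperChar else r

-- run-by-run renderer equivalent to tailF / headF
def renderT : Char → List (Char × List Char) → List Char
  | _, [] => []
  | pc, (k, r) :: rest =>
    if k = 's' then (if pc = 's' then [] else ['-']) ++ renderT 's' rest
    else (if pc = 's' ∨ pc = k then [] else ['-']) ++ emitRun k r ++ renderT k rest

def renderH : List (Char × List Char) → List Char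
  | [] => []
  | (k, r) :: rest => if k = 's' then renderH rest else emitRun k r ++ renderT k rest

-- recursive characterisation of pvParts
def partsSpec : List (Char × List Char) → List (List Char)
  | [] => []
  | (k, r) :: rest =>
    if k = 'a' then r.map PySem.Chars.upperChar :: partsSpec rest
    else if k = 'n' then r :: partsSpec rest else partsSpec rest

def rstripD (x : List Char) : List Char := (x.reverse.dropWhile (fun c => c == '-')).reverse

theorem classify_cases (c : Char) : pvClassify c = 'a' ∨ pvClassify c = 'n' ∨ pvClassify c = 's' := by
  unfold pvClassify; split_ifs <;> simp

theorem classify_dash : pvClassify '-' = 's' := by decide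

theorem stepA_start (c : Char) (hc : pvClassify c ≠ 's') :
    pvStepA ([], none) c = ([emitC c], some c) := by
  unfold pvStepA pvClassify emitC at *
  split_ifs at * <;> simp_all

theorem stepA_start_special (c : Char) (hc : pvClassify c = 's') :
    pvStepA ([], none) c = ([], none) := by
  unfold pvStepA pvClassify at *
  split_ifs at * <;> simp_all

theorem alpha_not_digit (p : Char) (h : PySem.Chars.isalpha p = true) : PySem.Chars.isdigit p = false := by
  simp [PySem.Chars.isalpha, PySem.Chars.isupper, PySem.Chars.islower] at h
  simp [PySem.Chars.isdigit]
  rcases h with ⟨h1,_⟩ | ⟨h1,_⟩ <;> intro _ <;> exact lt_of_lt_of_le (by decide) h1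

theorem stepA_alnum (res : List Char) (p c : Char) (hres : res ≠ []) (hc : pvClassify c ≠ 's') :
    pvStepA (res, some p) c =
      (res ++ (if pvClassify p = 's' ∨ pvClassify p = pvClassify c then [emitC c] else ['-', emitC c]), some c) := by
  have h0 : (res.length == 0) = false := by simp [hres]
  unfold pvStepA pvClassify emitC at *
  split_ifs at * <;> simp_all [alpha_not_digit]

theorem stepA_special (res : List Char) (p c : Char) (hres : res ≠ [])
    (hc : pvClassify c = 's') (hp : pvClassify p = 's' → p = '-') :
    pvStepA (res, some p) c = if pvClassify p = 's' then (res, some p) else (res ++ ['-'], some '-') := by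
  have h0 : (res.length == 0) = false := by simp [hres]
  have hdash : (pvClassify '-') = 's' := by decide
  unfold pvStepA pvClassify at *
  split_ifs at * <;> simp_all

theorem loopA_tail (cs : List Char) : ∀ (res : List Char) (p : Char), res ≠ [] → (pvClassify p = 's' → p = '-') →
    (cs.foldl pvStepA (res, some p)).1 = res ++ tailF cs (pvClassify p) := by
  induction cs with
  | nil => intro res p h1 h2; simp [tailF]
  | cons c cs ih =>
    intro res p hres hp
    rw [List.foldl_cons]
    by_cases hc : pvClassify c = 's'
    · rw [stepA_special res p c hres hc hp]
      by_cases hcp : pvClassify p = 's'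
      · rw [if_pos hcp, ih res p hres hp]
        simp [tailF, hc, hcp]
      · rw [if_neg hcp, ih (res ++ ['-']) '-' (by simp) (fun _ => rfl)]
        simp [tailF, hc, hcp, classify_dash]
    · rw [stepA_alnum res p c hres hc]
      rw [ih _ c (by split_ifs <;> simp) (fun h => absurd h hc)]
      by_cases hcp : pvClassify p = 's' ∨ pvClassify p = pvClassify c
      · simp [tailF, hc, hcp]
      · simp [tailF, hc, hcp]

theorem loopA_head (cs : List Char) : (cs.foldl pvStepA ([], none)).1 = headF cs := by
  induction cs with
  | nil => simp [headF]
  | cons c cs ih =>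
    rw [List.foldl_cons]
    by_cases hc : pvClassify c = 's'
    · rw [stepA_start_special c hc, ih]; simp [headF, hc]
    · rw [stepA_start c hc, loopA_tail cs [emitC c] c (by simp) (fun h => absurd h hc)]
      simp [headF, hc]

theorem emitC_classify (c : Char) : emitC c = if pvClassify c = 'a' then PySem.Chars.upperChar c else c := by
  unfold emitC pvClassify; split_ifs <;> simp_all

theorem tailF_render (cs : List Char) : ∀ pc, tailF cs pc = renderT pc (pvGroup cs) := by
  induction cs with
  | nil => intro pc; simp [tailF, pvGroup, renderT]
  | cons c cs ih =>
    intro pc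
    by_cases hc : pvClassify c = 's'
    · rcases hg : pvGroup cs with _ | ⟨⟨k, r⟩, gs⟩
      · simp [tailF, hc, ih, hg, pvGroup, renderT]
      · by_cases hck : pvClassify c = k
        · subst hck
          simp [tailF, hc, ih, hg, pvGroup, renderT]
          split_ifs <;> simp
        · have hsk : ¬('s' = k) := hc ▸ hck
          simp only [tailF, hc, if_pos, ih, hg, pvGroup, hsk, ite_false, renderT]
          split_ifs <;> simp
    · rcases hg : pvGroup cs with _ | ⟨⟨k, r⟩, gs⟩
      · simp [tailF, hc, ih, hg, pvGroup, renderT, emitRun, emitC_classify]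
        split_ifs <;> simp_all
      · by_cases hck : pvClassify c = k
        · subst hck
          simp [tailF, hc, ih, hg, pvGroup, renderT, emitRun, emitC_classify]
          split_ifs <;> simp_all
        · simp only [tailF, ih, hg, pvGroup]
          rw [if_neg hc, if_neg hck]
          simp [renderT, hc, hck, emitRun, emitC_classify]
          split_ifs <;> simp_all

theorem headF_render (cs : List Char) : headF cs = renderH (pvGroup cs) := by
  induction cs with
  | nil => simp [headF, pvGroup, renderH]
  | cons c cs ih =>
    by_cases hc : pvClassify c = 's'
    · rcases hg : pvGroup cs with _ | ⟨⟨k, r⟩, gs⟩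
      · simp [headF, hc, ih, hg, pvGroup, renderH]
      · by_cases hck : pvClassify c = k
        · subst hck
          simp [headF, hc, ih, hg, pvGroup, renderH]
        · have hsk : ¬('s' = k) := hc ▸ hck
          simp only [headF, hc, ih, hg, pvGroup, hsk, ite_false]
          simp [renderH]
    · rcases hg : pvGroup cs with _ | ⟨⟨k, r⟩, gs⟩
      · simp [headF, hc, tailF_render, hg, pvGroup, renderH, renderT, emitRun, emitC_classify]
        split_ifs <;> simp_all
      · by_cases hck : pvClassify c = k
        · subst hck
          simp [headF, hc, tailF_render, hg, pvGroup, renderH, renderT, emitRun, emitC_classify]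
          split_ifs <;> simp_all
        · simp only [headF, tailF_render, hg, pvGroup]
          rw [if_neg hc, if_neg hck]
          simp [renderH, renderT, hc, hck, emitRun, emitC_classify]
          split_ifs <;> simp_all

theorem group_keys (cs : List Char) : ∀ kr ∈ pvGroup cs, kr.1 = 'a' ∨ kr.1 = 'n' ∨ kr.1 = 's' := by
  induction cs with
  | nil => simp [pvGroup]
  | cons c cs ih =>
    intro kr hkr
    rcases hg : pvGroup cs with _ | ⟨⟨k, r⟩, gs⟩ <;> rw [hg] at ih
    · have hG : pvGroup (c :: cs) = [(pvClassify c, [c])] := by simp [pvGroup, hg]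
      rw [hG] at hkr
      rw [List.mem_singleton.mp hkr]
      simpa using classify_cases c
    · by_cases h : pvClassify c = k
      · have hG : pvGroup (c :: cs) = (k, c :: r) :: gs := by simp [pvGroup, hg, h]
        rw [hG] at hkr
        rcases List.mem_cons.mp hkr with rfl | hkr
        · have := classify_cases c; rw [h] at this; simpa using this
        · exact ih _ (List.mem_cons_of_mem _ hkr)
      · have hG : pvGroup (c :: cs) = (pvClassify c, [c]) :: (k, r) :: gs := by simp [pvGroup, hg, h]
        rw [hG] at hkr
        rcases List.mem_cons.mp hkr with rfl | hkr
        · simpa using classify_cases c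
        · exact ih _ hkr

theorem group_chain (cs : List Char) : List.IsChain (fun a b => a ≠ b) ((pvGroup cs).map Prod.fst) := by
  induction cs with
  | nil => simp [pvGroup]
  | cons c cs ih =>
    rcases hg : pvGroup cs with _ | ⟨⟨k, r⟩, gs⟩
    · simp [pvGroup, hg]
    · rw [hg] at ih
      by_cases hck : pvClassify c = k
      · simpa [pvGroup, hg, hck] using ih
      · simp only [pvGroup, hg, hck, ite_false, List.map_cons]
        simp only [List.map_cons] at ih ⊢
        exact List.isChain_cons_cons.mpr ⟨hck, ih⟩

theorem partsSpec_eq_nil (rs : List (Char × List Char))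
    (hk : ∀ kr ∈ rs, kr.1 = 'a' ∨ kr.1 = 'n' ∨ kr.1 = 's') :
    partsSpec rs = [] ↔ ∀ kr ∈ rs, kr.1 = 's' := by
  induction rs with
  | nil => simp [partsSpec]
  | cons kr rest ih =>
    obtain ⟨k, r⟩ := kr
    have hk' := hk ⟨k, r⟩ (by simp)
    have ihr := ih (fun x hx => hk x (by simp [hx]))
    simp only at hk'
    rcases hk' with hk1 | hk1 | hk1 <;> subst hk1 <;> simp [partsSpec, ihr]

theorem pvParts_foldl (gs : List (Char × List Char)) : ∀ acc,
    gs.foldl (fun acc kr =>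
      if kr.1 = 'a' then acc ++ [PySem.Chars.upper kr.2]
      else if kr.1 = 'n' then acc ++ [kr.2] else acc) acc = acc ++ partsSpec gs := by
  induction gs with
  | nil => simp [partsSpec]
  | cons kr rest ih =>
    intro acc
    obtain ⟨k, r⟩ := kr
    simp only [List.foldl_cons, partsSpec]
    split_ifs <;> rw [ih] <;> simp [PySem.Chars.upper]

theorem pvParts_eq_partsSpec (gs : List (Char × List Char)) : pvParts gs = partsSpec gs := by
  simpa using pvParts_foldl gs []

theorem partsSpec_ne_nil (k : Char) (r : List Char) (rest : List (Char × List Char))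
    (hk : k = 'a' ∨ k = 'n') : partsSpec ((k, r) :: rest) ≠ [] := by
  rcases hk with rfl | rfl <;> simp [partsSpec]

theorem lastKey_dash_of_parts_nil (rs : List (Char × List Char)) (hne : rs ≠ [])
    (hk : ∀ kr ∈ rs, kr.1 = 'a' ∨ kr.1 = 'n' ∨ kr.1 = 's')
    (hp : partsSpec rs = []) : rs.getLast?.map Prod.fst = some 's' := by
  have hall := (partsSpec_eq_nil rs hk).mp hp
  obtain ⟨kr, hmem⟩ := List.getLast?_isSome.mpr hne |> Option.isSome_iff_exists.mp
  rw [hmem]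
  simpa using hall kr (List.mem_of_getLast? hmem)

theorem renderT_join (rs : List (Char × List Char)) : ∀ pc,
    (∀ kr ∈ rs, kr.1 = 'a' ∨ kr.1 = 'n' ∨ kr.1 = 's') →
    List.IsChain (fun a b => a ≠ b) (rs.map Prod.fst) →
    (∀ kr ∈ rs.head?, kr.1 ≠ pc) →
    renderT pc rs =
      (if partsSpec rs = [] then []
       else (if pc = 's' then [] else ['-']) ++ PySem.Chars.join ['-'] (partsSpec rs)) ++
      (if rs.getLast?.map Prod.fst = some 's' then ['-'] else []) := by
  induction rs with
  | nil => intro pc _ _ _; simp [renderT, partsSpec]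
  | cons kr rest ih =>
    intro pc hk hch hh
    obtain ⟨k, r⟩ := kr
    have hkpc : k ≠ pc := by simpa using hh
    have hkrest : ∀ kr ∈ rest, kr.1 = 'a' ∨ kr.1 = 'n' ∨ kr.1 = 's' :=
      fun x hx => hk x (List.mem_cons_of_mem _ hx)
    have hkk := hk (k, r) List.mem_cons_self
    simp only at hkk
    have hchrest : List.IsChain (fun a b => a ≠ b) (k :: rest.map Prod.fst) := by
      simpa using hch
    by_cases hks : k = 's'
    · subst hks
      have hparts : partsSpec (('s', r) :: rest) = partsSpec rest := by simp [partsSpec]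
      have hL : renderT pc (('s', r) :: rest) = (if pc = 's' then [] else ['-']) ++ renderT 's' rest := by
        simp [renderT]
      rw [hL, hparts, if_neg (Ne.symm hkpc)]
      rcases hrest : rest with _ | ⟨⟨k2, r2⟩, gs2⟩
      · simp [renderT, partsSpec]
      · rw [hrest] at hchrest
        simp only [List.map_cons] at hchrest
        obtain ⟨hne12, hch2⟩ := List.isChain_cons_cons.mp hchrest
        have hk2 : k2 = 'a' ∨ k2 = 'n' := by
          have := hkrest (k2, r2) (by simp [hrest])
          simp only at this
          rcases this with h | h | h
          · exact Or.inl h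
          · exact Or.inr h
          · exact absurd h.symm hne12
        have hpne : partsSpec ((k2, r2) :: gs2) ≠ [] := partsSpec_ne_nil _ _ _ hk2
        have hih := ih 's' (hrest ▸ hkrest) (by simpa [hrest] using hch2)
          (by simp [hrest]; exact fun h => hne12 h.symm)
        rw [hrest] at hih
        rw [hih, if_neg hpne, if_neg hpne]
        simp only [List.getLast?_cons_cons]
        simp
    · have hkan : k = 'a' ∨ k = 'n' := by rcases hkk with h | h | h <;> simp_all
      have hparts : partsSpec ((k, r) :: rest) = emitRun k r :: partsSpec rest := by
        rcases hkan with rfl | rfl <;> simp [partsSpec, emitRun]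
      have hL : renderT pc ((k, r) :: rest) = (if pc = 's' ∨ pc = k then [] else ['-']) ++ emitRun k r ++ renderT k rest := by
        simp [renderT, hks]
      have hdash : (if pc = 's' ∨ pc = k then [] else ['-']) = (if pc = 's' then ([] : List Char) else ['-']) := by
        by_cases h1 : pc = 's' <;> simp [h1, Ne.symm hkpc]
      rw [hL, hdash, hparts]
      rcases hrest : rest with _ | ⟨⟨k2, r2⟩, gs2⟩
      · simp [renderT, partsSpec, PySem.Chars.join_singleton, hks]
      · rw [hrest] at hchrest
        simp only [List.map_cons] at hchrest
        obtain ⟨hne12, hch2⟩ := List.isChain_cons_cons.mp hchrest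
        have hih := ih k (hrest ▸ hkrest) (by simpa [hrest] using hch2)
          (by simp [hrest]; exact fun h => hne12 h.symm)
        rw [hrest] at hih
        rw [hih]
        by_cases hpn : partsSpec ((k2, r2) :: gs2) = []
        · have hlast : ((k2, r2) :: gs2).getLast?.map Prod.fst = some 's' :=
            lastKey_dash_of_parts_nil _ (by simp) (hrest ▸ hkrest) hpn
          simp only [List.getLast?_cons_cons]
          simp [hpn, hlast, PySem.Chars.join_singleton]
        · rcases hq : partsSpec ((k2, r2) :: gs2) with _ | ⟨q, qs⟩
          · exact absurd hq hpn
          · simp only [List.getLast?_cons_cons]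
            simp [PySem.Chars.join_cons_cons, hks]

theorem renderH_join (rs : List (Char × List Char))
    (hk : ∀ kr ∈ rs, kr.1 = 'a' ∨ kr.1 = 'n' ∨ kr.1 = 's')
    (hch : List.IsChain (fun a b => a ≠ b) (rs.map Prod.fst)) :
    renderH rs = PySem.Chars.join ['-'] (partsSpec rs) ++
      (if partsSpec rs ≠ [] ∧ rs.getLast?.map Prod.fst = some 's' then ['-'] else []) := by
  induction rs with
  | nil => simp [renderH, partsSpec]
  | cons kr rest ih =>
    obtain ⟨k, r⟩ := kr
    have hkrest : ∀ kr ∈ rest, kr.1 = 'a' ∨ kr.1 = 'n' ∨ kr.1 = 's' :=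
      fun x hx => hk x (List.mem_cons_of_mem _ hx)
    have hchrest : List.IsChain (fun a b => a ≠ b) (k :: rest.map Prod.fst) := by simpa using hch
    by_cases hks : k = 's'
    · subst hks
      have hparts : partsSpec (('s', r) :: rest) = partsSpec rest := by simp [partsSpec]
      have hH : renderH (('s', r) :: rest) = renderH rest := by simp [renderH]
      rw [hH, hparts, ih hkrest hchrest.tail]
      rcases hrest : rest with _ | ⟨⟨k2, r2⟩, gs2⟩
      · simp [partsSpec]
      · rw [List.getLast?_cons_cons]
    · have hkan : k = 'a' ∨ k = 'n' := by
        rcases hk (k, r) List.mem_cons_self with h | h | h <;> simp_all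
      have hparts : partsSpec ((k, r) :: rest) = emitRun k r :: partsSpec rest := by
        rcases hkan with rfl | rfl <;> simp [partsSpec, emitRun]
      have hH : renderH ((k, r) :: rest) = emitRun k r ++ renderT k rest := by simp [renderH, hks]
      rw [hH, hparts]
      rcases hrest : rest with _ | ⟨⟨k2, r2⟩, gs2⟩
      · simp [renderT, partsSpec, PySem.Chars.join_singleton, hks]
      · rw [hrest] at hchrest
        simp only [List.map_cons] at hchrest
        obtain ⟨hne12, hch2⟩ := List.isChain_cons_cons.mp hchrest
        have hT := renderT_join rest k (hrest ▸ hkrest) (by rw [hrest]; simpa using hch2)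
          (by simp [hrest]; exact fun h => hne12 h.symm)
        rw [hrest] at hT
        rw [hT]
        by_cases hpn : partsSpec ((k2, r2) :: gs2) = []
        · have hlast : ((k2, r2) :: gs2).getLast?.map Prod.fst = some 's' :=
            lastKey_dash_of_parts_nil _ (by simp) (hrest ▸ hkrest) hpn
          simp only [List.getLast?_cons_cons]
          simp [hpn, hlast, PySem.Chars.join_singleton]
        · rcases hq : partsSpec ((k2, r2) :: gs2) with _ | ⟨q, qs⟩
          · exact absurd hq hpn
          · simp only [List.getLast?_cons_cons]
            simp [PySem.Chars.join_cons_cons, hks]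
            split_ifs <;> simp_all

theorem pyGet_neg_one_getLast (r : List Char) (h : r ≠ []) : PySem.List.pyGet? r (-1) = r.getLast? := by
  have h1 : 1 ≤ r.length := List.length_pos_iff.mpr h
  simp only [PySem.List.pyGet?, PySem.List.pyIdx?, Int.reduceNeg, Int.neg_nonneg, Int.reduceLE, ↓reduceIte,
    neg_le_neg_iff, Nat.one_le_cast, neg_neg, Int.toNat_one, if_pos h1]
  simp [List.getLast?_eq_getElem?]

theorem rstripD_append_dash (x : List Char) : rstripD (x ++ ['-']) = rstripD x := by
  simp [rstripD, List.reverse_append]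

theorem pvStripA_eq_rstripD (r : List Char) : pvStripA r = rstripD r := by
  induction r using pvStripA.induct with
  | case1 r h ih =>
    rw [pvStripA, dif_pos h, ih]
    have hne : r ≠ [] := by rintro rfl; simp [PySem.List.pyGet?, PySem.List.pyIdx?] at h
    have hlast : r.getLast? = some '-' := by rw [← pyGet_neg_one_getLast r hne]; exact h
    have hsplit : r = r.dropLast ++ ['-'] := by
      conv_lhs => rw [← List.dropLast_append_getLast? '-' hlast]
    rw [pvSliceZeroNegOne]
    conv_rhs => rw [hsplit]
    rw [rstripD_append_dash]
  | case2 r h =>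
    rw [pvStripA, dif_neg h]
    rcases hr : r.reverse with _ | ⟨c, cs⟩
    · have : r = [] := by simpa using congrArg List.reverse hr
      simp [this, rstripD]
    · have hne : r ≠ [] := by rintro rfl; simp at hr
      have hlast : r.getLast? = some c := by
        rw [List.getLast?_eq_head?_reverse, hr]; rfl
      have hcd : ¬(c == '-') = true := by
        intro hc
        exact h (by rw [pyGet_neg_one_getLast r hne, hlast]; simp_all)
      have hcf : (c == '-') = false := by simpa using hcd
      rw [show rstripD r = (r.reverse.dropWhile (fun c => c == '-')).reverse from rfl, hr,
        List.dropWhile_cons, hcf]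
      simp [← hr]

theorem rstripD_take_dash (J : List Char) :
    rstripD (List.take 8 (J ++ ['-'])) = rstripD (List.take 8 J) := by
  rcases Nat.lt_or_ge J.length 8 with h | h
  case inr => rw [List.take_append_of_le_length h]
  · have h1 : (J ++ ['-']).length ≤ 8 := by simp; omega
    rw [List.take_of_length_le h1, List.take_of_length_le (by omega)]
    exact rstripD_append_dash J

theorem core_eq (cs : List Char) :
    ∃ d, (d = [] ∨ d = ['-']) ∧
      (cs.foldl pvStepA ([], none)).1 = PySem.Chars.join ['-'] (pvParts (pvGroup cs)) ++ d := by
  refine ⟨if partsSpec (pvGroup cs) ≠ [] ∧ (pvGroup cs).getLast?.map Prod.fst = some 's' then ['-'] else [],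
    by split_ifs <;> simp, ?_⟩
  rw [loopA_head, headF_render, pvParts_eq_partsSpec,
    renderH_join (pvGroup cs) (group_keys cs) (group_chain cs)]

theorem strip_eq (cs : List Char) :
    pvStripA (PySem.List.slice ((cs.foldl pvStepA ([], none)).1) (some 0) (some 8)) =
    ((PySem.List.slice (PySem.Chars.join ['-'] (pvParts (pvGroup cs))) (some 0) (some 8)).reverse.dropWhile
      (fun c => c == '-')).reverse := by
  obtain ⟨d, hd, hR⟩ := core_eq cs
  rw [hR]
  have hslice : ∀ xs : List Char, PySem.List.slice xs (some 0) (some 8) = xs.take 8 := by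
    intro xs; simp [pysem]
  rw [hslice, hslice, pvStripA_eq_rstripD]
  show _ = rstripD _
  rcases hd with rfl | rfl
  · simp
  · exact rstripD_take_dash _

-- ===== VERDICT (by name: the statement is the Claim_ definition above) =====
theorem licence_plate_spec : Claim_equal_licence_plate := by
  intro s _ _
  unfold Spec_licence_plate licence_plate licence_plate_alt
  by_cases hg : (PySem.Chars.strIsdigit s.toList || decide (PySem.Chars.len s.toList < 2)) = true
  · simp only [hg, if_true]
  · simp only [Bool.not_eq_true] at hg
    simp only [hg, Bool.false_eq_true, if_false]
    rw [strip_eq s.toList]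

theorem licence_plate_raises : Claim_raises_licence_plate := by
  unfold Claim_raises_licence_plate
  constructor
  · rintro s _ ⟨hlen, hall⟩ (h | hany)
    · omega
    · simp only [List.all_eq_true, List.any_eq_true] at hall hany
      obtain ⟨c, hc, hb⟩ := hany
      have := hall c hc; simp_all
  · refine ⟨by decide, by decide, by rfl⟩

-- self-check bundling the two delivered claims under one name
theorem licence_plate_claims_ok : Claim_equal_licence_plate ∧ Claim_raises_licence_plate :=
  ⟨licence_plate_spec, licence_plate_raises⟩
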